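-- pv_equiv track=rewrite | github.com/maple3142/My-CTF-Challenges | HITCON CTF 2024/Hyper512/solution/solve.py | find_square_eqs
-- ===== SOURCE A (Python) =====
-- def find_square_eqs(eq, length):
--     # find related equations by squaring
--     # i.e. a[k]=a[k+3]+a[k+4] -> a[k]=a[k+6]+a[k+8]
--     assert eq[0] == 0, "eq must start with 0 (constant term)"
--     eqs = [eq]
--     cur_eq = eq
--     while True:
--         if cur_eq[-1] * 2 >= length:
--             break
--         squared_eq = [2 * x for x in cur_eq]
--         eqs.append(squared_eq)
--         cur_eq = squared_eq
--     return eqs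
-- ===== SOURCE B (Python) =====
-- def find_square_eqs(eq, length):
--     # Direct computation: the j-th equation is eq scaled by 2**j, and we keep
--     # j = 0..k where k is the largest j with eq[-1]*2**j < length (k = 0 if none).
--     assert eq[0] == 0, "eq must start with 0 (constant term)"
--     e = eq[-1]
--     if e > 0 and 2 * e < length:
--         k = ((length - 1) // e).bit_length() - 1
--     else:
--         k = 0
--     return [[x << j for x in eq] for j in range(k + 1)]
-- ===== Notes on version B (the rewrite author's own statement) =====
-- stated objective: alternative
-- what changed: Replaces the stateful while-loop that threads a cumulatively doubled equation with a closed-form computation of the number of doublings via bit_length, then builds each row independently by shifting the original equation.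
import Mathlib
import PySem

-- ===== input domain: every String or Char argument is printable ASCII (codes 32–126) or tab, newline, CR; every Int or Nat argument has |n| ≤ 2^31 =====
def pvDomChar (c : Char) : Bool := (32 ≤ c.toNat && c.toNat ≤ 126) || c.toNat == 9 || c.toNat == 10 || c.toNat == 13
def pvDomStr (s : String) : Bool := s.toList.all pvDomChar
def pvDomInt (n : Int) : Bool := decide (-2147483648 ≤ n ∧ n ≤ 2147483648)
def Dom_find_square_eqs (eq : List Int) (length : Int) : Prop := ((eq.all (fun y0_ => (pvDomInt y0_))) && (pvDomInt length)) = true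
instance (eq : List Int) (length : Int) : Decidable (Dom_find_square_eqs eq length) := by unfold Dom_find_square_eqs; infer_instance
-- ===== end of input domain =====

-- B replaces A's stateful cumulative-doubling loop by a closed-form count of doublings
-- (bit_length) and independent row construction; equal on Pre_ (alternative decomposition, not faster).


-- ===== PORT A =====
-- the while-loop; fuel 64 is a totality guard only: on every input admitted by
-- Pre_ (and Dom) the loop breaks after at most 32 iterations (proved below)
def findSqLoopA (length : Int) (eqs : List (List Int)) (cur : List Int) : Nat → List (List Int)
  | 0 => eqs
  | fuel + 1 =>
    if (PySem.List.pyGet? cur (-1)).getD 0 * 2 ≥ length then eqs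
    else
      let squared := cur.map (fun x => 2 * x)
      findSqLoopA length (eqs ++ [squared]) squared fuel

def find_square_eqs (eq : List Int) (length : Int) : List (List Int) :=
  findSqLoopA length [eq] eq 64

-- ===== PORT B =====
def find_square_eqs_alt (eq : List Int) (length : Int) : List (List Int) :=
  let e := (PySem.List.pyGet? eq (-1)).getD 0
  let k : Nat :=
    if 0 < e ∧ 2 * e < length then
      PySem.Int.bitLength (PySem.Int.floordiv (length - 1) e) - 1
    else 0
  (List.range (k + 1)).map (fun j => eq.map (fun x => x <<< j))

-- ===== PRECONDITION & SPEC =====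
-- Pre_ excludes exactly the inputs on which Python A does not return normally:
-- eq = [] (IndexError), eq[0] ≠ 0 (AssertionError), and eq[-1] ≤ 0 with
-- 2*eq[-1] < length, on which A's while-loop never terminates (B returns [eq] there).
def Pre_find_square_eqs (eq : List Int) (length : Int) : Prop :=
  eq.head? = some 0 ∧ (0 < eq.getLast?.getD 0 ∨ length ≤ 2 * eq.getLast?.getD 0)
instance (eq : List Int) (length : Int) : Decidable (Pre_find_square_eqs eq length) := by
  unfold Pre_find_square_eqs; infer_instance

def pvWitness_find_square_eqs : List Int × Int := ([0, 1], 10)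

def Spec_find_square_eqs (eq : List Int) (length : Int) (out : List (List Int)) : Prop := out = find_square_eqs_alt eq length
instance (eq : List Int) (length : Int) (out : List (List Int)) : Decidable (Spec_find_square_eqs eq length out) := by unfold Spec_find_square_eqs; infer_instance

-- ===== CLAIM (what is proved, stated in full; the proofs are below) =====
def Claim_equal_find_square_eqs : Prop := ∀ (eq : List Int) (length : Int), Dom_find_square_eqs eq length → Pre_find_square_eqs eq length → Spec_find_square_eqs eq length (find_square_eqs eq length)

-- ===== LEMMAS AND PROOFS =====

-- the loop, started at a 2^j-scaled equation, appends the 2^(j+1) .. 2^K scalings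
theorem findSqLoopA_run (eq : List Int) (e length : Int) (K : Nat)
    (he : eq.getLast? = some e)
    (hlt : ∀ j : Nat, j < K → 2 * (e * 2 ^ j) < length)
    (hge : length ≤ 2 * (e * 2 ^ K)) :
    ∀ (fuel j : Nat) (acc : List (List Int)), j ≤ K → K - j < fuel →
      findSqLoopA length acc (eq.map (fun x => x * 2 ^ j)) fuel
        = acc ++ (List.range' (j + 1) (K - j)).map (fun i => eq.map (fun x => x * 2 ^ i)) := by
  intro fuel
  induction fuel with
  | zero => intro j acc _ h; omega
  | succ fuel ih =>
    intro j acc hjK hfuel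
    have hlast : (eq.map (fun x => x * 2 ^ j)).getLast? = some (e * 2 ^ j) := by
      rw [List.getLast?_map, he]; rfl
    by_cases hj : j = K
    · subst hj
      have hcond : (PySem.List.pyGet? (eq.map (fun x => x * 2 ^ j)) (-1)).getD 0 * 2 ≥ length := by
        rw [PySem.List.pyGet?_neg_one, hlast]; simpa [mul_comm] using hge
      simp [findSqLoopA, hcond]
    · have hjK' : j < K := lt_of_le_of_ne hjK hj
      have hcond : ¬ ((PySem.List.pyGet? (eq.map (fun x => x * 2 ^ j)) (-1)).getD 0 * 2 ≥ length) := by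
        rw [PySem.List.pyGet?_neg_one, hlast]
        have := hlt j hjK'
        simp only [Option.getD_some]
        omega
      have hsq : (eq.map (fun x => x * 2 ^ j)).map (fun x => 2 * x)
          = eq.map (fun x => x * 2 ^ (j + 1)) := by
        rw [List.map_map]; apply List.map_congr_left; intro x _
        simp [pow_succ]; ring
      rw [findSqLoopA, if_neg hcond]
      simp only [hsq]
      rw [ih (j + 1) (acc ++ [eq.map (fun x => x * 2 ^ (j + 1))]) (by omega) (by omega)]
      have hKj : K - j = (K - (j + 1)) + 1 := by omega
      rw [hKj, List.range'_succ, List.map_cons, List.append_assoc]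
      rfl

theorem find_square_eqs_main : ∀ (eq : List Int) (length : Int), Dom_find_square_eqs eq length → Pre_find_square_eqs eq length → find_square_eqs eq length = find_square_eqs_alt eq length := by
  intro eq length hdom hpre
  obtain ⟨hhead, hcase⟩ := hpre
  have hne : eq ≠ [] := by intro h; rw [h] at hhead; simp at hhead
  obtain ⟨e, he⟩ : ∃ e, eq.getLast? = some e := by
    cases h : eq.getLast? with
    | none => exact absurd (List.getLast?_eq_none_iff.mp h) hne
    | some e => exact ⟨e, rfl⟩
  have heD : eq.getLast?.getD 0 = e := by rw [he]; rfl
  rw [heD] at hcase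
  have hpy : PySem.List.pyGet? eq (-1) = some e := by rw [PySem.List.pyGet?_neg_one, he]
  by_cases hmain : 0 < e ∧ 2 * e < length
  · -- scaling case
    obtain ⟨hepos, h2e⟩ := hmain
    set q : Int := PySem.Int.floordiv (length - 1) e with hq
    have hq2 : 2 ≤ q := by
      rw [hq, PySem.Int.le_floordiv_iff_mul_le hepos]; omega
    have hqabs : (q.natAbs : Int) = q := Int.natAbs_of_nonneg (by omega)
    set K : Nat := PySem.Int.bitLength q - 1 with hK
    have hbl1 : 1 ≤ PySem.Int.bitLength q := by
      by_contra h
      have h0 : PySem.Int.bitLength q = 0 := by omega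
      have := PySem.Int.lt_two_pow_bitLength q
      rw [h0] at this
      omega
    have hlow : (2 : Int) ^ K ≤ q := by
      have h1 : 2 ^ (PySem.Int.bitLength q - 1) ≤ q.natAbs :=
        PySem.Int.two_pow_bitLength_le q (by omega)
      have : ((2 : Nat) ^ K : Int) ≤ (q.natAbs : Int) := by exact_mod_cast h1
      rw [hqabs] at this; push_cast at this; exact this
    have hhigh : q < (2 : Int) ^ (K + 1) := by
      have h1 : q.natAbs < 2 ^ (PySem.Int.bitLength q) := PySem.Int.lt_two_pow_bitLength q
      have hKe : K + 1 = PySem.Int.bitLength q := by omega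
      rw [hKe]
      have : (q.natAbs : Int) < ((2 : Nat) ^ PySem.Int.bitLength q : Int) := by exact_mod_cast h1
      rw [hqabs] at this; push_cast at this; exact this
    -- break-condition characterisation
    have hpowle : ∀ m : Nat, ((2 : Int) ^ m ≤ q ↔ e * 2 ^ m ≤ length - 1) := by
      intro m
      rw [hq, PySem.Int.le_floordiv_iff_mul_le hepos, mul_comm]
    have hlt : ∀ j : Nat, j < K → 2 * (e * 2 ^ j) < length := by
      intro j hj
      have hple : (2 : Int) ^ (j + 1) ≤ 2 ^ K := by
        apply pow_le_pow_right₀ (by norm_num) (by omega)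
      have := (hpowle (j + 1)).mp (le_trans hple hlow)
      rw [pow_succ] at this
      nlinarith [this]
    have hge : length ≤ 2 * (e * 2 ^ K) := by
      by_contra h
      push Not at h
      have : e * 2 ^ (K + 1) ≤ length - 1 := by rw [pow_succ]; nlinarith
      have := (hpowle (K + 1)).mpr this
      omega
    -- fuel bound: K < 64 from Dom (|length| ≤ 2^31)
    have hlen31 : length ≤ 2147483648 := by
      unfold Dom_find_square_eqs at hdom
      simp [pvDomInt] at hdom
      exact hdom.2.2
    have hqbound : q < 2 ^ 32 := by
      have hql : q < length := by
        rw [hq, PySem.Int.floordiv_lt_iff_lt_mul hepos]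
        nlinarith
      omega
    have hK64 : K < 64 := by
      by_contra h
      push Not at h
      have : (2 : Int) ^ 64 ≤ 2 ^ K := pow_le_pow_right₀ (by norm_num) h
      have h2 : (2 : Int) ^ 64 ≤ q := le_trans this hlow
      norm_num at h2
      omega
    -- run the loop
    have hmap0 : eq = eq.map (fun x => x * 2 ^ (0 : Nat)) := by simp
    have hrun := findSqLoopA_run eq e length K he hlt hge 64 0 [eq] (by omega) (by omega)
    rw [find_square_eqs]
    rw [show findSqLoopA length [eq] eq 64
        = findSqLoopA length [eq] (eq.map (fun x => x * 2 ^ (0 : Nat))) 64 by rw [← hmap0]]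
    rw [hrun]
    -- B's side
    rw [find_square_eqs_alt]
    simp only [hpy, Option.getD_some, ← hq, ← hK,
      if_pos (show 0 < e ∧ 2 * e < length from ⟨hepos, h2e⟩)]
    rw [List.range_eq_range', List.range'_succ, List.map_cons]
    simp [Int.shiftLeft_eq]
  · -- immediate break: A returns [eq], B's k = 0
    have hbreak : length ≤ 2 * e := by omega
    have hcond : (PySem.List.pyGet? eq (-1)).getD 0 * 2 ≥ length := by
      rw [hpy]; simp; omega
    rw [find_square_eqs, findSqLoopA, if_pos hcond]
    rw [find_square_eqs_alt]
    simp only [hpy, Option.getD_some, if_neg hmain]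
    simp [Int.shiftLeft_eq]

-- ===== VERDICT (by name: the statement is the Claim_ definition above) =====
theorem find_square_eqs_spec : Claim_equal_find_square_eqs := by
  intro eq length hdom hpre
  unfold Spec_find_square_eqs
  exact find_square_eqs_main eq length hdom hpre
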